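-- pv_equiv track=rewrite | github.com/artemon87/Provider | searchHelp2.py | createNodeSize
-- ===== SOURCE A (Python) =====
-- def createNodeSize(links, weighted = None):
--     startSize = 300
--     nodeSizes = []
--     for i in range(links + 1):
--         nodeSizes.append(startSize)
--         if weighted:
--             startSize += 300
--     return nodeSizes
-- ===== SOURCE B (Python) =====
-- def createNodeSize(links, weighted = None):
--     if weighted:
--         return [300 * (i + 1) for i in range(links + 1)]
--     return [300] * (links + 1)
-- ===== Notes on version B (the rewrite author's own statement) =====
-- stated objective: simpler
-- what changed: Replaces the running startSize accumulator and in-loop conditional with a branch on weighted and closed-form constructions: 300*(i+1) per index when weighted, [300]*(links+1) otherwise.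
import Mathlib
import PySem

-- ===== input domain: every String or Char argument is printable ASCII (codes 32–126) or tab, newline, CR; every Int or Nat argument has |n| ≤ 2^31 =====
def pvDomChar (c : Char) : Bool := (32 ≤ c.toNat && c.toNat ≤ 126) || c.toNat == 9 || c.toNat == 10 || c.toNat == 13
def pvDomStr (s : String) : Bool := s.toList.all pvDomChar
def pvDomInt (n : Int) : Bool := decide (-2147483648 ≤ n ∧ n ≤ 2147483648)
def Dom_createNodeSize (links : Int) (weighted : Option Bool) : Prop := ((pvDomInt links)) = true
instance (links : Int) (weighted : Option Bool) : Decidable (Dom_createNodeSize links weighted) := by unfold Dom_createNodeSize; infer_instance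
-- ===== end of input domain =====

-- ===== PORT A =====
-- B replaces A's running accumulator with a closed-form per-index construction; A and B are equal on all inputs.
def createNodeSize (links : Int) (weighted : Option Bool) : List Int :=
  ((PySem.List.pyRange 0 (links + 1) 1).foldl
    (fun (st : Int × List Int) _ =>
      let nodeSizes := st.2 ++ [st.1]
      (if weighted = some true then st.1 + 300 else st.1, nodeSizes))
    (300, [])).2

-- ===== PORT B =====
def createNodeSize_alt (links : Int) (weighted : Option Bool) : List Int :=
  if weighted = some true then
    (PySem.List.pyRange 0 (links + 1) 1).map (fun i => 300 * (i + 1))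
  else
    List.replicate (links + 1).toNat 300

-- ===== PRECONDITION & SPEC =====
def Spec_createNodeSize (links : Int) (weighted : Option Bool) (out : List Int) : Prop := out = createNodeSize_alt links weighted
instance (links : Int) (weighted : Option Bool) (out : List Int) : Decidable (Spec_createNodeSize links weighted out) := by unfold Spec_createNodeSize; infer_instance

-- ===== CLAIM (what is proved, stated in full; the proofs are below) =====
def Claim_equal_createNodeSize : Prop := ∀ (links : Int) (weighted : Option Bool), Dom_createNodeSize links weighted → Spec_createNodeSize links weighted (createNodeSize links weighted)

-- ===== LEMMAS AND PROOFS =====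

-- ===== VERDICT (by name: the statement is the Claim_ definition above) =====
-- unweighted: the fold keeps the start size fixed and appends it once per element
lemma foldl_const (l : List Int) (s : Int) (acc : List Int) :
    (l.foldl (fun (st : Int × List Int) _ => (st.1, st.2 ++ [st.1])) (s, acc)).2
      = acc ++ List.replicate l.length s := by
  induction l generalizing acc with
  | nil => simp
  | cons x xs ih => simp [List.foldl, ih, List.replicate_succ]

-- weighted: the fold appends s + 300*k at step k
lemma foldl_step (l : List Int) (s : Int) (acc : List Int) :
    (l.foldl (fun (st : Int × List Int) _ => (st.1 + 300, st.2 ++ [st.1])) (s, acc)).2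
      = acc ++ List.map (fun k : Nat => s + 300 * (k : Int)) (List.range l.length) := by
  induction l generalizing s acc with
  | nil => simp
  | cons x xs ih =>
    rw [List.foldl_cons, ih, List.length_cons, List.range_succ_eq_map,
      List.map_cons, List.map_map]
    simp only [List.append_assoc, List.singleton_append,
      Nat.cast_zero, mul_zero, add_zero]
    congr 2
    apply List.map_congr_left; intro k _
    simp only [Function.comp_def, Nat.succ_eq_add_one]
    push_cast; ring

theorem createNodeSize_spec : Claim_equal_createNodeSize := by
  intro links weighted _
  unfold Spec_createNodeSize createNodeSize createNodeSize_alt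
  by_cases h : weighted = some true
  · simp only [h, if_true]
    rw [foldl_step, PySem.List.pyRange_one 0 (links + 1)]
    simp only [List.map_map, List.length_map, List.length_range, List.nil_append]
    apply List.map_congr_left; intro k _
    simp only [Function.comp_def]
    ring
  · simp only [h, if_false]
    rw [foldl_const, PySem.List.length_pyRange_one]
    simp
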